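-- pv_equiv track=rewrite | github.com/puppy1012/CodingTest | programmers/둘만의 암호.py | solution
-- ===== SOURCE A (Python) =====
-- def solution(s, skip, index):
--     skip_set=set(skip)
--     answer = ''
--     for char in s:
--         count=0
--         next_char=ord(char) #아스키 숫자형식으로 변환
--         #skip 문자는 건너뛰고 index만큼 이동하되, 'z'를 넘으면 'a'로 순환
--         while count<index:#count가 index만큼
--             next_char+=1
--             if next_char>ord('z'):#z를 넘어갈시 대문자로 넘어가기에
--                 next_char=ord('a')#a로 초기화
--             if chr(next_char) not in skip_set:#비교를 위해 ord로 변환한걸 chr로 재변환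
--                 count+=1#이후 문자열 비교를 통해 count추가 할지 확인
--
--         answer+=chr(next_char)
--
--
--     return answer
-- ===== SOURCE B (Python) =====
-- def solution(s, skip, index):
--     skip_set = set(skip)
--     if index <= 0:
--         return s
--     allowed = [q for q in range(97, 123) if chr(q) not in skip_set]
--     m = len(allowed)
--     out = []
--     for ch in s:
--         p = ord(ch)
--         pre = [q for q in range(p + 1, 123) if chr(q) not in skip_set]
--         if index <= len(pre):
--             out.append(chr(pre[index - 1]))
--         else:
--             r = index - len(pre)
--             out.append(chr(allowed[(r - 1) % m]))
--     return ''.join(out)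
-- ===== Notes on version B (the rewrite author's own statement) =====
-- stated objective: faster
-- what changed: A advances each character one code point at a time, looping until index non-skip positions have been counted; B precomputes the list of allowed lowercase letters once and, per character, the non-skipped codes on the ramp up to 'z', then lands directly with one modular index into the allowed cycle, so per-character work is bounded by the alphabet size instead of growing with index.
import Mathlib
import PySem

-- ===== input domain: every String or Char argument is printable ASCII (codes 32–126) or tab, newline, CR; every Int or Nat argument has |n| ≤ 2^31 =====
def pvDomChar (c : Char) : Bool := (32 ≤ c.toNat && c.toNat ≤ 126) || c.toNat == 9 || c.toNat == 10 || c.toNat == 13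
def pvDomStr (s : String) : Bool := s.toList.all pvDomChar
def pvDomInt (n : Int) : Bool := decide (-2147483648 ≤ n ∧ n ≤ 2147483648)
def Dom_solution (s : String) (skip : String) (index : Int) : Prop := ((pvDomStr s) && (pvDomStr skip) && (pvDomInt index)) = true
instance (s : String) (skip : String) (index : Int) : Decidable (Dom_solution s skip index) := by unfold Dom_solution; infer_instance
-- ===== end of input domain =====

-- B replaces A's per-character step-by-step walk (index iterations per character) by a precomputed
-- allowed-letter cycle and one modular jump per character: measurably faster when index is large.


-- ===== PORT A =====
-- chr(n) for a code held as a Python int (exact for the codes 0..127 that occur here)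
def chrI (n : Int) : Char := Char.ofNat n.toNat
-- 'chr(q) not in skip_set'
def notSkip (sk : PySem.Set Char) (q : Int) : Bool := !(PySem.Set.contains sk (chrI q))

-- A's inner while loop: state (count, next_char); fuel only makes the loop total —
-- under Pre_solution the fuel passed below is at least the number of iterations A performs.
def solLoopA (sk : PySem.Set Char) (index : Int) : Nat → Int → Int → Int
  | 0, _, next => next
  | f + 1, count, next =>
    if count < index then
      let n1 := next + 1
      let n2 := if n1 > 122 then 97 else n1
      solLoopA sk index f (if notSkip sk n2 then count + 1 else count) n2
    else next

def solution (s : String) (skip : String) (index : Int) : String :=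
  let sk : PySem.Set Char := PySem.Set.ofList skip.toList
  s.toList.foldl
    (fun answer ch => answer.push (chrI (solLoopA sk index ((140 * index + 140).toNat) 0 (ch.toNat : Int))))
    ""

-- ===== PORT B =====
def solution_alt (s : String) (skip : String) (index : Int) : String :=
  let sk : PySem.Set Char := PySem.Set.ofList skip.toList
  if index ≤ 0 then s
  else
    let allowed : List Int := (PySem.List.pyRange 97 123 1).filter (notSkip sk)
    let m : Int := allowed.length
    String.ofList <| s.toList.map (fun ch =>
      let p : Int := (ch.toNat : Int)
      let pre : List Int := (PySem.List.pyRange (p + 1) 123 1).filter (notSkip sk)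
      if index ≤ (pre.length : Int) then
        chrI ((PySem.List.pyGet? pre (index - 1)).getD 97)      -- index always in range; getD for totality
      else
        let r : Int := index - (pre.length : Int)
        chrI ((PySem.List.pyGet? allowed (PySem.Int.mod (r - 1) m)).getD 97))

-- ===== PRECONDITION & SPEC =====
-- A's while loop terminates iff index ≤ 0, or some lowercase letter is not skipped, or every
-- character of s has at least index non-skipped codes strictly between it and 'z' (its initial ramp).
-- Pre_ is exactly that condition; outside it A loops forever (and B raises ZeroDivisionError).
def Pre_solution (s : String) (skip : String) (index : Int) : Prop :=
  index ≤ 0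
  ∨ ((PySem.List.pyRange 97 123 1).filter
       (fun q => !(PySem.Set.contains (PySem.Set.ofList skip.toList) (Char.ofNat q.toNat))) ≠ [])
  ∨ (∀ c ∈ s.toList, index ≤
       ((((PySem.List.pyRange ((c.toNat : Int) + 1) 123 1).filter
           (fun q => !(PySem.Set.contains (PySem.Set.ofList skip.toList) (Char.ofNat q.toNat)))).length : Int)))
instance (s : String) (skip : String) (index : Int) : Decidable (Pre_solution s skip index) := by
  unfold Pre_solution; infer_instance

def pvWitness_solution : String × String × Int := ("aw z", "qw", 5)

def Spec_solution (s : String) (skip : String) (index : Int) (out : String) : Prop := out = solution_alt s skip index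
instance (s : String) (skip : String) (index : Int) (out : String) : Decidable (Spec_solution s skip index out) := by unfold Spec_solution; infer_instance

-- ===== CLAIM (what is proved, stated in full; the proofs are below) =====
def Claim_equal_solution : Prop := ∀ (s : String) (skip : String) (index : Int), Dom_solution s skip index → Pre_solution s skip index → Spec_solution s skip index (solution s skip index)

-- ===== LEMMAS AND PROOFS =====

-- the non-skipped codes strictly between p and 'z' (inclusive), in increasing order: B's `pre`
def rampL (P : Int → Bool) (p : Int) : List Int := (PySem.List.pyRange (p + 1) 123 1).filter P
-- the non-skipped lowercase codes: B's `allowed`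
def allowL (P : Int → Bool) : List Int := (PySem.List.pyRange 97 123 1).filter P
-- the first counted position A's walk reaches from p
def nextC (P : Int → Bool) (p : Int) : Int :=
  match rampL P p with
  | q :: _ => q
  | [] => (allowL P).headD 97
-- A's walk described one counted position at a time
def gIter (P : Int → Bool) : Nat → Int → Int
  | 0, p => p
  | i + 1, p => gIter P i (nextC P p)
-- B's per-character value, as an Int code
def bChar (P : Int → Bool) (index : Int) (p : Int) : Int :=
  let pre := rampL P p
  if index ≤ (pre.length : Int) then (PySem.List.pyGet? pre (index - 1)).getD 97
  else (PySem.List.pyGet? (allowL P) (PySem.Int.mod (index - (pre.length : Int) - 1) ((allowL P).length : Int))).getD 97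

theorem filt_cons {P : Int → Bool} {a b q : Int} {t : List Int}
    (h : (PySem.List.pyRange a b 1).filter P = q :: t) :
    a ≤ q ∧ q < b ∧ P q = true ∧ (∀ r, a ≤ r → r < q → P r = false)
      ∧ t = (PySem.List.pyRange (q + 1) b 1).filter P := by
  by_cases hab : b ≤ a
  · rw [PySem.List.pyRange_one_eq_nil hab] at h; simp at h
  · replace hab : a < b := by omega
    have hn : ∃ n : Nat, b - a = (n : Int) + 1 := ⟨(b - a - 1).toNat, by omega⟩
    obtain ⟨n, hn⟩ := hn
    induction n generalizing a with
    | zero =>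
        rw [PySem.List.pyRange_one_cons hab] at h
        have hnil : PySem.List.pyRange (a+1) b 1 = [] := PySem.List.pyRange_one_eq_nil (by omega)
        rw [hnil] at h
        by_cases hpa : P a
        · simp [List.filter_cons, hpa] at h
          refine ⟨by omega, by omega, ?_, ?_, ?_⟩
          · rw [← h.1]; exact hpa
          · intro r h1 h2; omega
          · rw [h.2, ← h.1, hnil]; simp
        · simp [List.filter_cons, hpa] at h
    | succ m ih =>
        rw [PySem.List.pyRange_one_cons hab] at h
        by_cases hpa : P a
        · simp only [List.filter_cons, hpa, if_pos] at h
          injection h with h1 h2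
          subst h1
          exact ⟨by omega, by omega, hpa, by intro r h1' h2'; omega, h2.symm⟩
        · simp only [List.filter_cons, hpa] at h
          simp at h
          have := ih (a := a + 1) h (by omega) (by omega)
          refine ⟨by omega, this.2.1, this.2.2.1, ?_, this.2.2.2.2⟩
          intro r hr1 hr2
          rcases eq_or_lt_of_le hr1 with he | hl
          · rw [← he]; simpa using hpa
          · exact this.2.2.2.1 r (by omega) hr2

theorem filt_nil {P : Int → Bool} {a b : Int}
    (h : (PySem.List.pyRange a b 1).filter P = []) :
    ∀ r, a ≤ r → r < b → P r = false := by
  intro r h1 h2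
  have hm : r ∈ PySem.List.pyRange a b 1 := (PySem.List.mem_pyRange_one).mpr ⟨h1, h2⟩
  have := List.filter_eq_nil_iff.mp h r hm
  simpa using this

theorem loop_shift (sk : PySem.Set Char) (index : Int) :
    ∀ (f : Nat) (c p : Int), solLoopA sk index f (c + 1) p = solLoopA sk (index - 1) f c p := by
  intro f
  induction f with
  | zero => intro c p; simp [solLoopA]
  | succ n ih =>
      intro c p
      simp only [solLoopA]
      by_cases hc : c < index - 1
      · rw [if_pos (by omega), if_pos hc]
        by_cases hs : notSkip sk (if p + 1 > 122 then 97 else p + 1)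
        · simp only [hs, if_pos]; exact ih (c + 1) _
        · simp only [hs, Bool.false_eq_true, if_false]; exact ih c _
      · rw [if_neg (by omega), if_neg hc]

theorem adv_ramp (sk : PySem.Set Char) (index : Int) :
    ∀ (n : Nat) (p q : Int), q = p + (n : Int) + 1 → q ≤ 122 →
      (∀ r, p < r → r < q → notSkip sk r = false) → notSkip sk q = true →
      ∀ (f : Nat) (c : Int), c < index →
        solLoopA sk index (n + 1 + f) c p = solLoopA sk index f (c + 1) q := by
  intro n
  induction n with
  | zero =>
      intro p q hq h122 _ hPq f c hc
      have he : 0 + 1 + f = f + 1 := by omega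
      rw [he]
      simp only [solLoopA]
      rw [if_pos hc]
      have h1 : p + 1 = q := by push_cast at hq; omega
      have hno : ¬ (p + 1 > 122) := by omega
      rw [if_neg hno, h1, hPq]
      simp
  | succ m ih =>
      intro p q hq h122 hmid hPq f c hc
      have he : (m + 1) + 1 + f = (m + 1 + f) + 1 := by omega
      rw [he]
      simp only [solLoopA]
      rw [if_pos hc]
      have hlt : p + 1 < q := by push_cast at hq; omega
      have hno : ¬ (p + 1 > 122) := by omega
      rw [if_neg hno]
      rw [hmid (p + 1) (by omega) hlt]
      simp only [Bool.false_eq_true, if_false]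
      exact ih (p + 1) q (by push_cast at hq ⊢; omega) h122
        (fun r h1 h2 => hmid r (by omega) h2) hPq f c hc

theorem adv_to_122 (sk : PySem.Set Char) (index : Int) :
    ∀ (n : Nat) (p : Int), (122 : Int) = p + (n : Int) →
      (∀ r, p < r → r ≤ 122 → notSkip sk r = false) →
      ∀ (f : Nat) (c : Int), c < index →
        solLoopA sk index (n + f) c p = solLoopA sk index f c 122 := by
  intro n
  induction n with
  | zero => intro p hp _ f c _
            have h : p = 122 := by push_cast at hp; omega
            rw [h]; norm_num
  | succ m ih =>
      intro p hp hmid f c hc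
      have he : (m + 1) + f = (m + f) + 1 := by omega
      rw [he]
      simp only [solLoopA]
      have hno : ¬ (p + 1 > 122) := by push_cast at hp; omega
      rw [if_pos hc, if_neg hno]
      rw [hmid (p + 1) (by omega) (by push_cast at hp; omega)]
      simp only [Bool.false_eq_true, if_false]
      exact ih (p + 1) (by push_cast at hp ⊢; omega)
        (fun r h1 h2 => hmid r (by omega) h2) f c hc

theorem adv_wrap (sk : PySem.Set Char) (index : Int) (p : Int) (hp : (122 : Int) ≤ p) :
    ∀ (f : Nat) (c : Int), c < index →
      solLoopA sk index (1 + f) c p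
        = solLoopA sk index f (if notSkip sk 97 then c + 1 else c) 97 := by
  intro f c hc
  have he : 1 + f = f + 1 := by omega
  rw [he]
  simp only [solLoopA]
  have hyes : p + 1 > 122 := by omega
  rw [if_pos hc, if_pos hyes]

theorem adv_one (sk : PySem.Set Char) (index : Int) (p : Int)
    (hp1 : (9 : Int) ≤ p) (hp2 : p ≤ 126)
    (h : rampL (notSkip sk) p ≠ [] ∨ allowL (notSkip sk) ≠ []) :
    ∃ d : Nat, d ≤ 139 ∧ ∀ (f : Nat) (c : Int), c < index →
      solLoopA sk index (d + f) c p = solLoopA sk index f (c + 1) (nextC (notSkip sk) p) := by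
  cases hr : rampL (notSkip sk) p with
  | cons q t =>
      obtain ⟨h1, h2, h3, h4, _⟩ := filt_cons (show (PySem.List.pyRange (p+1) 123 1).filter (notSkip sk) = q :: t from hr)
      have hnc : nextC (notSkip sk) p = q := by rw [nextC, hr]
      refine ⟨(q - p - 1).toNat + 1, by omega, ?_⟩
      intro f c hc
      rw [hnc]
      exact adv_ramp sk index (q - p - 1).toNat p q (by omega) (by omega)
        (fun r hr1 hr2 => h4 r (by omega) hr2) h3 f c hc
  | nil =>
      have hall : allowL (notSkip sk) ≠ [] := by
        rcases h with h | h
        · exact absurd hr h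
        · exact h
      cases ha : allowL (notSkip sk) with
      | nil => exact absurd ha hall
      | cons a t =>
          obtain ⟨g1, g2, g3, g4, _⟩ := filt_cons (show (PySem.List.pyRange 97 123 1).filter (notSkip sk) = a :: t from ha)
          have hnil := filt_nil (show (PySem.List.pyRange (p+1) 123 1).filter (notSkip sk) = [] from hr)
          have hnc : nextC (notSkip sk) p = a := by rw [nextC, hr, ha]; rfl
          rw [hnc]
          have tail : ∀ (p' : Int), (122 : Int) ≤ p' → ∀ (f : Nat) (c : Int), c < index →
              solLoopA sk index (1 + ((a - 97).toNat + f)) c p' = solLoopA sk index f (c + 1) a := by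
            intro p' hp' f c hc
            by_cases h97 : a = 97
            · subst h97
              simp only [Int.sub_self, Int.toNat_zero, Nat.zero_add]
              rw [adv_wrap sk index p' hp' f c hc, g3]
              simp
            · have hgt : 97 < a := by omega
              have hP97 : notSkip sk 97 = false := g4 97 (by omega) hgt
              have harith : (a - 97).toNat + f = ((a - 98).toNat + 1) + f := by omega
              rw [harith]
              rw [adv_wrap sk index p' hp' _ c hc, hP97]
              simp only [Bool.false_eq_true, if_false]
              have : (a - 98).toNat + 1 + f = (a-98).toNat + 1 + f := rfl
              exact adv_ramp sk index (a - 98).toNat 97 a (by omega) (by omega)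
                (fun r hr1 hr2 => g4 r (by omega) hr2) g3 f c hc
          by_cases hple : p ≤ 122
          · refine ⟨(122 - p).toNat + (1 + (a - 97).toNat), by omega, ?_⟩
            intro f c hc
            have harith : (122 - p).toNat + (1 + (a - 97).toNat) + f
                = (122 - p).toNat + (1 + ((a - 97).toNat + f)) := by omega
            rw [harith]
            rw [adv_to_122 sk index (122 - p).toNat p (by omega)
              (fun r hr1 hr2 => hnil r (by omega) (by omega)) _ c hc]
            exact tail 122 (by omega) f c hc
          · refine ⟨1 + (a - 97).toNat, by omega, ?_⟩
            intro f c hc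
            have harith : 1 + (a - 97).toNat + f = 1 + ((a - 97).toNat + f) := by omega
            rw [harith]
            exact tail p (by omega) f c hc

theorem nextC_bounds (P : Int → Bool) (p : Int) (hp1 : (9 : Int) ≤ p)
    (h : rampL P p ≠ [] ∨ allowL P ≠ []) :
    (9 : Int) ≤ nextC P p ∧ nextC P p ≤ 126 := by
  cases hr : rampL P p with
  | cons q t =>
      obtain ⟨h1, h2, _, _, _⟩ := filt_cons (show (PySem.List.pyRange (p+1) 123 1).filter P = q :: t from hr)
      have hnc : nextC P p = q := by rw [nextC, hr]
      rw [hnc]; constructor <;> omega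
  | nil =>
      have hall : allowL P ≠ [] := by
        rcases h with h | h
        · exact absurd hr h
        · exact h
      cases ha : allowL P with
      | nil => exact absurd ha hall
      | cons a t =>
          obtain ⟨h1, h2, _, _, _⟩ := filt_cons (show (PySem.List.pyRange 97 123 1).filter P = a :: t from ha)
          have hnc : nextC P p = a := by rw [nextC, hr, ha]; rfl
          rw [hnc]; constructor <;> omega

theorem inv_step (P : Int → Bool) (p : Int) (i : Nat)
    (h : allowL P ≠ [] ∨ ((i : Int) + 1) ≤ ((rampL P p).length : Int)) :
    (rampL P p ≠ [] ∨ allowL P ≠ [])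
      ∧ (allowL P ≠ [] ∨ (i : Int) ≤ ((rampL P (nextC P p)).length : Int)) := by
  rcases h with h | h
  · exact ⟨Or.inr h, Or.inl h⟩
  · obtain ⟨q, t, hr⟩ : ∃ q t, rampL P p = q :: t := by
      cases hl : rampL P p with
      | nil => rw [hl] at h; simp at h; omega
      | cons q t => exact ⟨q, t, rfl⟩
    obtain ⟨_, _, _, _, h5⟩ := filt_cons (show (PySem.List.pyRange (p+1) 123 1).filter P = q :: t from hr)
    have hnc : nextC P p = q := by rw [nextC, hr]
    refine ⟨Or.inl (by rw [hr]; simp), Or.inr ?_⟩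
    rw [hnc, show rampL P q = t from h5.symm]
    rw [hr] at h
    simp at h ⊢
    omega

theorem main_loop (sk : PySem.Set Char) :
    ∀ (i : Nat) (p : Int), (9 : Int) ≤ p → p ≤ 126 →
      (allowL (notSkip sk) ≠ [] ∨ (i : Int) ≤ ((rampL (notSkip sk) p).length : Int)) →
      ∀ f : Nat, 140 * i + 140 ≤ f →
        solLoopA sk (i : Int) f 0 p = gIter (notSkip sk) i p := by
  intro i
  induction i with
  | zero =>
      intro p _ _ _ f hf
      cases f with
      | zero => omega
      | succ n =>
          simp only [solLoopA]
          rw [if_neg (by norm_num)]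
          rfl
  | succ i ih =>
      intro p hp1 hp2 hinv f hf
      obtain ⟨hinv1, hinv2⟩ := inv_step (notSkip sk) p i hinv
      obtain ⟨d, hd, hadv⟩ := adv_one sk ((i + 1 : Nat) : Int) p hp1 hp2 hinv1
      have hfd : d + (f - d) = f := by omega
      have step1 : solLoopA sk ((i + 1 : Nat) : Int) f 0 p
          = solLoopA sk ((i + 1 : Nat) : Int) (f - d) 1 (nextC (notSkip sk) p) := by
        have hs := hadv (f - d) 0 (by push_cast; omega)
        rw [hfd] at hs
        simpa using hs
      have step2 : solLoopA sk ((i + 1 : Nat) : Int) (f - d) 1 (nextC (notSkip sk) p)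
          = solLoopA sk ((i : Nat) : Int) (f - d) 0 (nextC (notSkip sk) p) := by
        have h1 : (1 : Int) = 0 + 1 := by ring
        rw [h1, loop_shift]
        congr 1
        push_cast
        ring
      have hb := nextC_bounds (notSkip sk) p hp1 hinv1
      have step3 : solLoopA sk ((i : Nat) : Int) (f - d) 0 (nextC (notSkip sk) p)
          = gIter (notSkip sk) i (nextC (notSkip sk) p) :=
        ih (nextC (notSkip sk) p) hb.1 hb.2 hinv2 (f - d) (by omega)
      rw [step1, step2, step3]
      rfl

theorem pyget_cons_pos (q : Int) (t : List Int) (i : Int) (hi : 1 ≤ i) :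
    PySem.List.pyGet? (q :: t) i = PySem.List.pyGet? t (i - 1) := by
  have h0 : (0 : Int) ≤ i := by omega
  have h1 : (0 : Int) ≤ i - 1 := by omega
  rw [PySem.List.pyGet?_of_nonneg (q :: t) h0, PySem.List.pyGet?_of_nonneg t h1]
  have hsucc : i.toNat = (i - 1).toNat + 1 := by omega
  rw [hsucc]
  simp

theorem bChar_rec (P : Int → Bool) (i : Int) (p : Int) (hi : 1 ≤ i)
    (h : allowL P ≠ [] ∨ i + 1 ≤ ((rampL P p).length : Int)) :
    bChar P (i + 1) p = bChar P i (nextC P p) := by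
  cases hr : rampL P p with
  | cons q t =>
      obtain ⟨_, _, _, _, h5⟩ := filt_cons (show (PySem.List.pyRange (p+1) 123 1).filter P = q :: t from hr)
      have hnc : nextC P p = q := by rw [nextC, hr]
      have hrq : rampL P q = t := h5.symm
      rw [hnc]
      simp only [bChar, hr, hrq]
      by_cases hle : i ≤ (t.length : Int)
      · rw [if_pos (by simp only [List.length_cons, List.length_nil]; omega), if_pos hle]
        have e1 : i + 1 - 1 = i := by ring
        rw [e1, pyget_cons_pos q t i hi]
      · rw [if_neg (by simp only [List.length_cons, List.length_nil]; omega), if_neg hle]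
        congr 2
        simp only [List.length_cons]
        push_cast
        ring
  | nil =>
      have hall : allowL P ≠ [] := by
        rcases h with h | h
        · exact h
        · rw [hr] at h; simp at h; omega
      cases ha : allowL P with
      | nil => exact absurd ha hall
      | cons a t =>
          obtain ⟨_, _, _, _, g5⟩ := filt_cons (show (PySem.List.pyRange 97 123 1).filter P = a :: t from ha)
          have hnc : nextC P p = a := by rw [nextC, hr, ha]; rfl
          have hra : rampL P a = t := g5.symm
          rw [hnc]
          simp only [bChar, hr, hra, ha]
          rw [if_neg (by simp only [List.length_cons, List.length_nil]; omega)]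
          have hm : ((a :: t).length : Int) = (t.length : Int) + 1 := by simp
          by_cases hle : i ≤ (t.length : Int)
          · rw [if_pos hle]
            have e1 : i + 1 - ((0 : Nat) : Int) - 1 = i := by simp
            have hmodi : PySem.Int.mod i ((a :: t).length : Int)= i := by
              rw [PySem.Int.mod_eq_emod_of_pos (by simp only [List.length_cons, List.length_nil]; omega)]
              exact Int.emod_eq_of_lt (by omega) (by simp only [List.length_cons, List.length_nil]; omega)
            simp only [List.length_nil, e1, hmodi]
            rw [pyget_cons_pos a t i hi]
          · rw [if_neg hle]
            congr 2
            have e1 : i + 1 - ((0 : Nat) : Int) - 1 = i := by simp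
            simp only [List.length_nil, e1]
            rw [PySem.Int.mod_eq_emod_of_pos (by simp only [List.length_cons, List.length_nil]; omega),
                PySem.Int.mod_eq_emod_of_pos (by simp only [List.length_cons, List.length_nil]; omega)]
            have e2 : i - (t.length : Int) - 1 = i - ((a :: t).length : Int) := by simp only [List.length_cons, List.length_nil]; push_cast; ring
            rw [e2]
            simp

theorem gIter_eq_bChar (P : Int → Bool) :
    ∀ (i : Nat) (p : Int), 1 ≤ i →
      (allowL P ≠ [] ∨ (i : Int) ≤ ((rampL P p).length : Int)) →
      gIter P i p = bChar P (i : Int) p := by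
  intro i
  induction i with
  | zero => intro p h0; omega
  | succ n ih =>
      intro p _ hinv
      cases n with
      | zero =>
          cases hr : rampL P p with
          | cons q t =>
              have hnc : nextC P p = q := by rw [nextC, hr]
              have hg : gIter P 1 p = q := by rw [gIter, gIter, hnc]
              rw [hg]
              simp only [bChar, hr]
              rw [if_pos (by simp only [List.length_cons, List.length_nil]; omega)]
              norm_num
          | nil =>
              have hall : allowL P ≠ [] := by
                rcases hinv with h | h
                · exact h
                · rw [hr] at h; simp only [List.length_nil] at h; omega
              cases ha : allowL P with
              | nil => exact absurd ha hall
              | cons a t =>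
                  have hnc : nextC P p = a := by rw [nextC, hr, ha]; rfl
                  have hg : gIter P 1 p = a := by rw [gIter, gIter, hnc]
                  rw [hg]
                  simp only [bChar, hr, ha]
                  rw [if_neg (by simp)]
                  have e1 : ((1 : Nat) : Int) - ((0 : Nat) : Int) - 1 = 0 := by simp
                  simp only [List.length_nil, e1]
                  have hmod0 : PySem.Int.mod 0 ((a :: t).length : Int) = 0 := by
                    rw [PySem.Int.mod_eq_emod_of_pos (by simp only [List.length_cons, List.length_nil]; omega)]
                    simp
                  rw [hmod0]
                  simp [PySem.List.pyGet?_zero_cons]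
      | succ m =>
          have hinv' : allowL P ≠ [] ∨ ((m + 1 : Nat) : Int) + 1 ≤ ((rampL P p).length : Int) := by
            rcases hinv with h | h
            · exact Or.inl h
            · right; push_cast at h ⊢; omega
          obtain ⟨hinv1, hinv2⟩ := inv_step P p (m + 1) hinv'
          have hstep : gIter P (m + 1 + 1) p = gIter P (m + 1) (nextC P p) := rfl
          rw [hstep, ih (nextC P p) (by omega) hinv2]
          have := bChar_rec P ((m + 1 : Nat) : Int) p (by push_cast; omega) hinv'
          rw [show ((m + 2 : Nat) : Int) = ((m + 1 : Nat) : Int) + 1 by push_cast; ring]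
          exact this.symm

theorem loop_nonpos (sk : PySem.Set Char) (index : Int) (h : index ≤ 0) (f : Nat) (p : Int) :
    solLoopA sk index f 0 p = p := by
  cases f with
  | zero => simp [solLoopA]
  | succ n => simp only [solLoopA]; rw [if_neg (by omega)]

theorem foldl_push_map (g : Char → Char) (l : List Char) :
    ∀ acc : String, l.foldl (fun a c => a.push (g c)) acc = acc ++ String.ofList (l.map g) := by
  induction l with
  | nil => intro acc; simp
  | cons x xs ih =>
      intro acc
      simp only [List.foldl_cons, ih, List.map_cons]
      apply String.toList_inj.mp
      simp

-- ===== VERDICT (by name: the statement is the Claim_ definition above) =====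
theorem perchar (sk : PySem.Set Char) (index : Int) (hge : 1 ≤ index) (p : Int)
    (hp1 : (9 : Int) ≤ p) (hp2 : p ≤ 126)
    (hinv : allowL (notSkip sk) ≠ [] ∨ index ≤ ((rampL (notSkip sk) p).length : Int)) :
    solLoopA sk index ((140 * index + 140).toNat) 0 p = bChar (notSkip sk) index p := by
  have hie : ((index.toNat : Nat) : Int) = index := by omega
  have hinv' : allowL (notSkip sk) ≠ [] ∨ ((index.toNat : Nat) : Int) ≤ ((rampL (notSkip sk) p).length : Int) := by
    rw [hie]; exact hinv
  have h1 : solLoopA sk index ((140 * index + 140).toNat) 0 p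
      = gIter (notSkip sk) index.toNat p := by
    rw [← hie]
    exact main_loop sk index.toNat p hp1 hp2 hinv' _ (by omega)
  rw [h1, gIter_eq_bChar (notSkip sk) index.toNat p (by omega) hinv', hie]

theorem solution_spec : Claim_equal_solution := by
  intro s skip index hdom hpre
  show solution s skip index = solution_alt s skip index
  have hdomS : ∀ c ∈ s.toList, (9 : Int) ≤ (c.toNat : Int) ∧ (c.toNat : Int) ≤ 126 := by
    intro c hc
    have h1 : pvDomStr s = true := by
      simp only [Dom_solution, Bool.and_eq_true] at hdom
      exact hdom.1.1
    have h2 := (List.all_eq_true.mp h1) c hc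
    simp only [pvDomChar, Bool.or_eq_true, Bool.and_eq_true, decide_eq_true_eq, beq_iff_eq] at h2
    rcases h2 with ((⟨hl, hr⟩ | h9) | h10) | h13 <;> constructor <;> omega
  simp only [solution, solution_alt]
  by_cases hidx : index ≤ 0
  · rw [if_pos hidx]
    rw [foldl_push_map (fun ch => chrI (solLoopA (PySem.Set.ofList skip.toList) index
      ((140 * index + 140).toNat) 0 (ch.toNat : Int))) s.toList ""]
    have hmap : s.toList.map (fun ch => chrI (solLoopA (PySem.Set.ofList skip.toList) index
        ((140 * index + 140).toNat) 0 (ch.toNat : Int))) = s.toList.map id := by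
      apply List.map_congr_left
      intro c _
      rw [loop_nonpos _ _ hidx]
      simp [chrI]
    rw [hmap, List.map_id, String.empty_append]
    exact String.ofList_toList
  · rw [if_neg hidx]
    have hge : 1 ≤ index := by omega
    rw [foldl_push_map (fun ch => chrI (solLoopA (PySem.Set.ofList skip.toList) index
      ((140 * index + 140).toNat) 0 (ch.toNat : Int))) s.toList ""]
    have hmap : ∀ c ∈ s.toList,
        chrI (solLoopA (PySem.Set.ofList skip.toList) index ((140 * index + 140).toNat) 0 (c.toNat : Int))
          = (fun ch : Char =>
              if index ≤ (((PySem.List.pyRange ((ch.toNat : Int) + 1) 123 1).filter (notSkip (PySem.Set.ofList skip.toList))).length : Int) then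
                chrI ((PySem.List.pyGet? ((PySem.List.pyRange ((ch.toNat : Int) + 1) 123 1).filter (notSkip (PySem.Set.ofList skip.toList))) (index - 1)).getD 97)
              else
                chrI ((PySem.List.pyGet? ((PySem.List.pyRange 97 123 1).filter (notSkip (PySem.Set.ofList skip.toList)))
                  (PySem.Int.mod (index - (((PySem.List.pyRange ((ch.toNat : Int) + 1) 123 1).filter (notSkip (PySem.Set.ofList skip.toList))).length : Int) - 1)
                    ((((PySem.List.pyRange 97 123 1).filter (notSkip (PySem.Set.ofList skip.toList))).length : Int)))).getD 97)) c := by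
      intro c hc
      have hb := hdomS c hc
      have hinv : allowL (notSkip (PySem.Set.ofList skip.toList)) ≠ []
          ∨ index ≤ ((rampL (notSkip (PySem.Set.ofList skip.toList)) (c.toNat : Int)).length : Int) := by
        rcases hpre with h | h | h
        · exact absurd h hidx
        · exact Or.inl h
        · exact Or.inr (h c hc)
      rw [perchar (PySem.Set.ofList skip.toList) index hge (c.toNat : Int) hb.1 hb.2 hinv]
      simp only [bChar, rampL, allowL, apply_ite chrI]
    rw [List.map_congr_left hmap]
    exact String.empty_append
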